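-- pv_equiv track=rewrite | github.com/wonjeonn/gems-game | overflow_logic.py | check_same_sign
-- ===== SOURCE A (Python) =====
-- def check_same_sign(grid):
--     value_sign = None
--     for row in grid:
--         for cell in row:
--             if cell != 0:
--                 if value_sign is None:
--                     value_sign = 1 if cell > 0 else -1
--                 elif (cell > 0 and value_sign > 0) or (cell < 0 and value_sign < 0):
--                     continue
--                 else:
--                     return False
--     return True
-- ===== SOURCE B (Python) =====
-- def check_same_sign(grid):
--     signs = {cell > 0 for row in grid for cell in row if cell != 0}
--     return len(signs) <= 1
-- ===== Notes on version B (the rewrite author's own statement) =====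
-- stated objective: simpler
-- what changed: Replaced the stateful sentinel walk with early return by a one-pass set comprehension of the signs of non-zero cells followed by a cardinality test (len(signs) <= 1).
import Mathlib
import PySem

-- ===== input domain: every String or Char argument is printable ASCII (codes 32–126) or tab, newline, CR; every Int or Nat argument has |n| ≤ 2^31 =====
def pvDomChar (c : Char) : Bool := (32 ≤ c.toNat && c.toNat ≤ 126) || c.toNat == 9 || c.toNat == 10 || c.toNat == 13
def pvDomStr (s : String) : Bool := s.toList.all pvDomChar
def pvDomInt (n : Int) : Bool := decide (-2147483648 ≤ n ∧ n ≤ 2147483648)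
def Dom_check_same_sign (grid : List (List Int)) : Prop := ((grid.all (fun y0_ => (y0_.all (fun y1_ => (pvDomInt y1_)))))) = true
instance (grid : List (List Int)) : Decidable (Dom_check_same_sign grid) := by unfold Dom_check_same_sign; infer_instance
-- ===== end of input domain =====

-- B replaces A's running-sentinel/early-return scan by collecting the signs of the
-- non-zero cells into a set and testing its cardinality (simpler decomposition).

-- ===== PORT A =====
-- inner 'for cell in row' loop; state = value_sign; 'none' result = early 'return False'
def cssCells (sign : Option Int) : List Int → Option (Option Int)
  | [] => some sign
  | c :: cs =>
    if c ≠ 0 then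
      match sign with
      | none => cssCells (some (if c > 0 then 1 else -1)) cs
      | some s =>
        if (c > 0 && s > 0) || (c < 0 && s < 0) then cssCells (some s) cs
        else none
    else cssCells sign cs

-- outer 'for row in grid' loop
def cssRows (sign : Option Int) : List (List Int) → Bool
  | [] => true
  | r :: rs =>
    match cssCells sign r with
    | none => false
    | some s => cssRows s rs

def check_same_sign (grid : List (List Int)) : Bool := cssRows none grid

-- ===== PORT B =====
def check_same_sign_alt (grid : List (List Int)) : Bool :=
  let signs : PySem.Set Bool :=
    PySem.Set.ofList (((grid.flatMap (fun row => row)).filter (fun c => c ≠ 0)).map (fun c => decide (c > 0)))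
  decide (PySem.Set.len signs ≤ 1)

-- ===== PRECONDITION & SPEC =====
def Spec_check_same_sign (grid : List (List Int)) (out : Bool) : Prop := out = check_same_sign_alt grid
instance (grid : List (List Int)) (out : Bool) : Decidable (Spec_check_same_sign grid out) := by unfold Spec_check_same_sign; infer_instance

-- ===== CLAIM (what is proved, stated in full; the proofs are below) =====
def Claim_equal_check_same_sign : Prop := ∀ (grid : List (List Int)), Dom_check_same_sign grid → Spec_check_same_sign grid (check_same_sign grid)

-- ===== LEMMAS AND PROOFS =====

-- ----- A side -----
theorem cells_pos (s : Int) (hs : 0 < s) (r : List Int) :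
    cssCells (some s) r = if r.any (fun c => decide (c < 0)) then none else some (some s) := by
  induction r with
  | nil => simp [cssCells]
  | cons c cs ih =>
    by_cases h0 : c = 0
    · subst h0; simpa [cssCells] using ih
    · by_cases hp : c > 0
      · have h1 : ¬ (c < 0) := by omega
        simp [cssCells, h0, hp, hs, h1, ih]
      · have hneg : c < 0 := by omega
        simp [cssCells, h0, hp, hneg, show ¬ s < 0 by omega]

theorem cells_neg (s : Int) (hs : s < 0) (r : List Int) :
    cssCells (some s) r = if r.any (fun c => decide (c > 0)) then none else some (some s) := by
  induction r with
  | nil => simp [cssCells]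
  | cons c cs ih =>
    by_cases h0 : c = 0
    · subst h0; simpa [cssCells] using ih
    · by_cases hp : c > 0
      · simp [cssCells, h0, hp, show ¬ s > 0 by omega, show ¬ c < 0 by omega]
      · have hneg : c < 0 := by omega
        simp [cssCells, h0, hp, hneg, hs, ih]

theorem cells_none (r : List Int) :
    cssCells none r =
      if r.any (fun c => decide (c > 0)) then
        (if r.any (fun c => decide (c < 0)) then none else some (some 1))
      else if r.any (fun c => decide (c < 0)) then some (some (-1)) else some none := by
  induction r with
  | nil => simp [cssCells]
  | cons c cs ih =>
    by_cases h0 : c = 0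
    · subst h0; simpa [cssCells] using ih
    · by_cases hp : c > 0
      · simp [cssCells, h0, hp, show ¬ c < 0 by omega, cells_pos 1 (by norm_num)]
      · have hneg : c < 0 := by omega
        simp [cssCells, h0, hp, hneg, cells_neg (-1) (by norm_num)]

theorem rows_pos (s : Int) (hs : 0 < s) (rs : List (List Int)) :
    cssRows (some s) rs = !((rs.flatMap (fun row => row)).any (fun c => decide (c < 0))) := by
  induction rs with
  | nil => simp [cssRows]
  | cons r rest ih =>
    simp only [cssRows, List.flatMap_cons, List.any_append]
    rw [cells_pos s hs]
    by_cases h : r.any (fun c => decide (c < 0)) <;> simp [h, ih]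

theorem rows_neg (s : Int) (hs : s < 0) (rs : List (List Int)) :
    cssRows (some s) rs = !((rs.flatMap (fun row => row)).any (fun c => decide (c > 0))) := by
  induction rs with
  | nil => simp [cssRows]
  | cons r rest ih =>
    simp only [cssRows, List.flatMap_cons, List.any_append]
    rw [cells_neg s hs]
    by_cases h : r.any (fun c => decide (c > 0)) <;> simp [h, ih]

theorem css_mid (grid : List (List Int)) :
    check_same_sign grid =
      !((grid.flatMap (fun row => row)).any (fun c => decide (c > 0)) &&
        (grid.flatMap (fun row => row)).any (fun c => decide (c < 0))) := by
  unfold check_same_sign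
  induction grid with
  | nil => simp [cssRows]
  | cons r rest ih =>
    simp only [cssRows, List.flatMap_cons, List.any_append]
    rw [cells_none]
    by_cases hp : r.any (fun c => decide (c > 0)) <;>
      by_cases hn : r.any (fun c => decide (c < 0))
    · simp [hp, hn]
    · simp [hp, hn, rows_pos 1 (by norm_num) rest]
    · simp [hp, hn, rows_neg (-1) (by norm_num) rest]
    · simp [hp, hn, ih]

-- ----- B side -----
theorem setBool_card (l : List Bool) :
    (PySem.Set.ofList l).length ≤ 1 ↔ ¬(true ∈ l ∧ false ∈ l) := by
  have hm : ∀ x : Bool, x ∈ PySem.Set.ofList l ↔ x ∈ l := fun x => PySem.Set.mem_ofList l x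
  have hnd : (PySem.Set.ofList l).Nodup := PySem.Set.nodup_ofList l
  constructor
  · intro h hc
    obtain ⟨ht, hf⟩ := hc
    rw [← hm] at ht hf
    rcases hS : PySem.Set.ofList l with _ | ⟨a, _ | ⟨b, t⟩⟩
    · rw [hS] at ht; simp at ht
    · rw [hS] at ht hf; simp at ht hf; simp [ht] at hf
    · rw [hS] at h; simp at h
  · intro h
    by_contra hlen
    rcases hS : PySem.Set.ofList l with _ | ⟨a, _ | ⟨b, t⟩⟩
    · rw [hS] at hlen; simp at hlen
    · rw [hS] at hlen; simp at hlen
    · rw [hS] at hnd hm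
      have hab : a ≠ b := by
        simp [List.nodup_cons] at hnd; tauto
      have ha : a ∈ l := (hm a).mp (by simp)
      have hb : b ∈ l := (hm b).mp (by simp)
      cases a <;> cases b <;> simp_all

theorem css_alt_mid (grid : List (List Int)) :
    check_same_sign_alt grid =
      !((grid.flatMap (fun row => row)).any (fun c => decide (c > 0)) &&
        (grid.flatMap (fun row => row)).any (fun c => decide (c < 0))) := by
  unfold check_same_sign_alt
  simp only [PySem.Set.len]
  set flat := grid.flatMap (fun row => row) with hflat
  set L := (flat.filter (fun c => decide (c ≠ 0))).map (fun c => decide (c > 0)) with hL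
  have hT : (true ∈ L) ↔ flat.any (fun c => decide (c > 0)) = true := by
    rw [hL]
    simp only [List.mem_map, List.mem_filter, List.any_eq_true]
    constructor
    · rintro ⟨c, ⟨hc, hne⟩, hd⟩
      exact ⟨c, hc, hd⟩
    · rintro ⟨c, hc, hd⟩
      refine ⟨c, ⟨hc, ?_⟩, hd⟩
      simp at hd ⊢; omega
  have hF : (false ∈ L) ↔ flat.any (fun c => decide (c < 0)) = true := by
    rw [hL]
    simp only [List.mem_map, List.mem_filter, List.any_eq_true]
    constructor
    · rintro ⟨c, ⟨hc, hne⟩, hd⟩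
      refine ⟨c, hc, ?_⟩
      simp at hd hne ⊢; omega
    · rintro ⟨c, hc, hd⟩
      refine ⟨c, ⟨hc, ?_⟩, ?_⟩ <;> simp at hd ⊢ <;> omega
  have key : (((PySem.Set.ofList L).length : Int) ≤ 1) ↔
      ¬(flat.any (fun c => decide (c > 0)) = true ∧ flat.any (fun c => decide (c < 0)) = true) := by
    have hcast : (((PySem.Set.ofList L).length : Int) ≤ 1) ↔ (PySem.Set.ofList L).length ≤ 1 := by
      exact_mod_cast Iff.rfl
    rw [hcast, setBool_card L]
    constructor
    · intro h hc; exact h ⟨hT.mpr hc.1, hF.mpr hc.2⟩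
    · intro h hc; exact h ⟨hT.mp hc.1, hF.mp hc.2⟩
  rcases hp : flat.any (fun c => decide (c > 0)) <;>
    rcases hn : flat.any (fun c => decide (c < 0)) <;>
    simp [key, hp, hn]

-- ===== VERDICT (by name: the statement is the Claim_ definition above) =====
theorem check_same_sign_spec : Claim_equal_check_same_sign := by
  intro grid _
  unfold Spec_check_same_sign
  rw [css_mid, css_alt_mid]
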